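-- pv_equiv track=rewrite | github.com/Yaro1/contests | yandex_cup_23/backend/b_again.py | char_positions
-- ===== SOURCE A (Python) =====
-- def char_positions(t):
--     pos = {}
--     for idx, c in enumerate(t):
--         if c in pos:
--             pos[c].append(idx)
--         else:
--             pos[c] = [idx]
--     return pos
-- ===== SOURCE B (Python) =====
-- def char_positions(t):
--     return {c: [i for i, x in enumerate(t) if x == c] for c in dict.fromkeys(t)}
-- ===== Notes on version B (the rewrite author's own statement) =====
-- stated objective: alternative
-- what changed: Instead of one dispatching pass that grows per-key lists in a dict, B first computes the distinct characters (dict.fromkeys) and then builds each character's index list by its own scan of enumerate(t).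
import Mathlib
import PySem

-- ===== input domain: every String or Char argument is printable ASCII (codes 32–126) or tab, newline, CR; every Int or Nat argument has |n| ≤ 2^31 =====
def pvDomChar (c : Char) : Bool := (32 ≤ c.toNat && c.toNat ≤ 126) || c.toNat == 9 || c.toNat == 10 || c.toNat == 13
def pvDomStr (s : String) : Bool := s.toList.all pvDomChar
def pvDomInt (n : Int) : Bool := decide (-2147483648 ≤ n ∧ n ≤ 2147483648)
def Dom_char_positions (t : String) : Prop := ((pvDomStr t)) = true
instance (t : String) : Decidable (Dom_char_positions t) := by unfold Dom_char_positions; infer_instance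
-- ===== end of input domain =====

-- B replaces A's single dispatching dict-building pass by: compute the distinct characters
-- first, then one scan of enumerate(t) per distinct character (objective: alternative).

-- ===== PORT A =====
-- the loop body of A: append idx to the existing list, or start a new one
def pvStep (pos : PySem.Dict String (List Int)) (p : Int × Char) : PySem.Dict String (List Int) :=
  if pos.contains (String.singleton p.2) then
    pos.modify (String.singleton p.2) [] (fun xs => xs ++ [p.1])
  else
    pos.insert (String.singleton p.2) [p.1]

def char_positions (t : String) : List (String × List Int) :=
  ((PySem.List.enumerate t.toList).foldl pvStep PySem.Dict.empty).items

-- ===== PORT B =====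
-- the inner comprehension of B: [i for i, x in enumerate(t) if x == c]
def pvPositions (l : List Char) (c : Char) : List Int :=
  (PySem.List.enumerate l).filterMap (fun p => if p.2 = c then some p.1 else none)

def char_positions_alt (t : String) : List (String × List Int) :=
  (PySem.List.dedup t.toList).map (fun c => (String.singleton c, pvPositions t.toList c))

-- ===== PRECONDITION & SPEC =====
def Spec_char_positions (t : String) (out : List (String × List Int)) : Prop := out = char_positions_alt t
instance (t : String) (out : List (String × List Int)) : Decidable (Spec_char_positions t out) := by unfold Spec_char_positions; infer_instance

-- ===== CLAIM (what is proved, stated in full; the proofs are below) =====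
def Claim_equal_char_positions : Prop := ∀ (t : String), Dom_char_positions t → Spec_char_positions t (char_positions t)

-- ===== LEMMAS AND PROOFS =====

lemma pv_singleton_eq_iff (a b : Char) : String.singleton a = String.singleton b ↔ a = b := by
  constructor
  · intro h; have := congrArg String.toList h; simpa using this
  · intro h; rw [h]

lemma pv_singleton_beq (a b : Char) : (String.singleton a == String.singleton b) = decide (a = b) := by
  rw [Bool.eq_iff_iff]
  simp [beq_iff_eq, pv_singleton_eq_iff]

lemma pv_positions_nil_of_not_mem (l : List Char) (c : Char) (s : Int) (h : c ∉ l) :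
    (PySem.List.enumerate l s).filterMap (fun p => if p.2 = c then some p.1 else none) = [] := by
  induction l generalizing s with
  | nil => simp [PySem.List.enumerate_nil]
  | cons x xs ih =>
      have hxc : ¬ (x = c) := fun e => h (by simp [e])
      rw [PySem.List.enumerate_cons]
      simp only [List.filterMap_cons, hxc, if_false]
      exact ih _ (fun hm => h (List.mem_cons_of_mem _ hm))

lemma pv_positions_append_singleton (l : List Char) (c d : Char) :
    pvPositions (l ++ [c]) d
      = pvPositions l d ++ (if c = d then [((l.length : Int))] else []) := by
  simp only [pvPositions, PySem.List.enumerate_append, List.filterMap_append]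
  congr 1
  simp [PySem.List.enumerate_cons, PySem.List.enumerate_nil]
  split_ifs <;> simp_all

lemma pv_dedup_append_singleton (l : List Char) (c : Char) :
    PySem.List.dedup (l ++ [c])
      = if c ∈ l then PySem.List.dedup l else PySem.List.dedup l ++ [c] := by
  have hm : (c ∈ List.foldl PySem.Set.add [] l) ↔ c ∈ l := by
    simpa [PySem.Set.ofList, PySem.Set.empty] using PySem.Set.mem_ofList l c
  by_cases h : c ∈ l <;>
    simp [PySem.List.dedup, PySem.Set.ofList, List.foldl_append, PySem.Set.add,
      PySem.Set.contains, List.contains_eq_mem, PySem.Set.empty, hm, h]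

lemma pv_contains_mk_map (ds : List Char) (g : Char → List Int) (c : Char) :
    (PySem.Dict.mk (ds.map (fun d => (String.singleton d, g d)))).contains (String.singleton c)
      = decide (c ∈ ds) := by
  induction ds with
  | nil => simp [PySem.Dict.contains]
  | cons x xs ih =>
      by_cases hx : x = c
      · subst hx; simp [PySem.Dict.contains]
      · simp only [PySem.Dict.contains, List.map_cons, List.any_cons, pv_singleton_beq,
          hx, decide_false, Bool.false_or] at ih ⊢
        rw [ih]
        simp [Ne.symm hx]

lemma pv_getD_mk_map (ds : List Char) (g : Char → List Int) (c : Char) (h : c ∈ ds) :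
    (PySem.Dict.mk (ds.map (fun d => (String.singleton d, g d)))).getD (String.singleton c) []
      = g c := by
  induction ds with
  | nil => simp at h
  | cons x xs ih =>
      by_cases hx : x = c
      · subst hx; simp [PySem.Dict.getD, PySem.Dict.get?]
      · have h2 : c ∈ xs := by
          rcases List.mem_cons.1 h with h1 | h2
          · exact absurd h1.symm hx
          · exact h2
        simpa [PySem.Dict.getD, PySem.Dict.get?, List.find?_cons, pv_singleton_beq, hx]
          using ih h2

lemma pv_fold_eq (l : List Char) :
    (PySem.List.enumerate l).foldl pvStep PySem.Dict.empty
      = PySem.Dict.mk ((PySem.List.dedup l).map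
          (fun c => (String.singleton c, pvPositions l c))) := by
  induction l using List.reverseRecOn with
  | nil => rfl
  | append_singleton l c ih =>
      rw [show PySem.List.enumerate (l ++ [c]) = PySem.List.enumerate l ++ [((l.length : Int), c)] by
            simp [PySem.List.enumerate_append, PySem.List.enumerate_cons, PySem.List.enumerate_nil]]
      rw [List.foldl_append, ih]
      simp only [List.foldl_cons, List.foldl_nil]
      rw [pv_dedup_append_singleton]
      unfold pvStep
      rw [pv_contains_mk_map]
      by_cases h : c ∈ l
      · have hd : c ∈ PySem.List.dedup l := by simpa [PySem.List.mem_dedup] using h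
        rw [if_pos h]
        simp only [decide_eq_true_eq, hd, if_pos]
        rw [PySem.Dict.modify, pv_getD_mk_map _ _ _ hd, PySem.Dict.insert,
          if_pos (by rw [pv_contains_mk_map]; simpa using hd)]
        simp only [List.map_map]
        congr 1
        apply List.map_congr_left
        intro d hdm
        by_cases hdc : d = c
        · subst hdc
          simp [pv_positions_append_singleton]
        · simp [Function.comp, pv_singleton_beq, hdc,
            pv_positions_append_singleton, Ne.symm hdc]
      · have hd : c ∉ PySem.List.dedup l := by simpa [PySem.List.mem_dedup] using h
        rw [if_neg h]
        simp only [decide_eq_true_eq, hd, if_false]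
        rw [PySem.Dict.insert, if_neg (by rw [pv_contains_mk_map]; simpa using hd)]
        simp only [List.map_append, List.map_cons, List.map_nil]
        congr 1
        congr 1
        · apply List.map_congr_left
          intro d hdm
          have hdl : d ∈ l := by
            have := (PySem.List.mem_dedup l d).1 hdm
            exact this
          have hdc : ¬ (c = d) := fun e => h (e ▸ hdl)
          simp [pv_positions_append_singleton, hdc]
        · have hnil : pvPositions l c = [] := pv_positions_nil_of_not_mem l c 0 h
          simp [pv_positions_append_singleton, hnil]

-- ===== VERDICT (by name: the statement is the Claim_ definition above) =====
theorem char_positions_spec : Claim_equal_char_positions := by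
  intro t _
  show char_positions t = char_positions_alt t
  unfold char_positions char_positions_alt
  rw [pv_fold_eq]
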